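-- pv_equiv track=rewrite | github.com/spritter-org/spritter | src/spritter/providers/omv/lib/ocr.py | has_artifacts
-- ===== SOURCE A (Python) =====
-- def has_artifacts(label: str) -> bool:
--     if not label or not any(c.isalpha() for c in label):
--         return False
--
--     if any(d in label and l.lower() in label.lower() for d, l in [('1', 'I'), ('0', 'O'), ('5', 'S')]):
--         return True
--
--     transitions = sum(1 for i in range(1, len(label))
--                      if label[i].isupper() != label[i-1].isupper() and label[i].isalpha() and label[i-1].isalpha())
--     return transitions > 2
-- ===== SOURCE B (Python) =====
-- def has_artifacts(label: str) -> bool: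
--     # Classify each character: 0 = non-letter, 1 = lowercase letter, 2 = uppercase letter.
--     cats = [(2 if c.isupper() else 1) if c.isalpha() else 0 for c in label]
--
--     # Run-length-compress the class sequence: adjacent equal classes collapse,
--     # so each boundary between two letter-runs of opposite case is exactly one
--     # case transition of the original string (non-letter runs separate them).
--     runs = []
--     for k in cats:
--         if not runs or runs[-1] != k:
--             runs.append(k)
--
--     if not any(runs):
--         return False
--     if sum(1 for a, b in zip(runs, runs[1:]) if a and b) > 2:
--         return True
--
--     # Digit/letter confusability: one case-folded character set answers all six
--     # membership questions (digits are unchanged by lower()).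
--     seen = set(label.lower())
--     return any(d in seen and l in seen for d, l in (('1', 'i'), ('0', 'o'), ('5', 's')))
-- ===== Notes on version B (the rewrite author's own statement) =====
-- stated objective: alternative
-- what changed: B classifies characters into case classes, run-length-compresses that class sequence and counts letter-run boundaries on the compressed runs (instead of A's index-based adjacent-pair scan), and answers the six digit/letter co-occurrence tests with one case-folded character set instead of six substring searches.
import Mathlib
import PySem

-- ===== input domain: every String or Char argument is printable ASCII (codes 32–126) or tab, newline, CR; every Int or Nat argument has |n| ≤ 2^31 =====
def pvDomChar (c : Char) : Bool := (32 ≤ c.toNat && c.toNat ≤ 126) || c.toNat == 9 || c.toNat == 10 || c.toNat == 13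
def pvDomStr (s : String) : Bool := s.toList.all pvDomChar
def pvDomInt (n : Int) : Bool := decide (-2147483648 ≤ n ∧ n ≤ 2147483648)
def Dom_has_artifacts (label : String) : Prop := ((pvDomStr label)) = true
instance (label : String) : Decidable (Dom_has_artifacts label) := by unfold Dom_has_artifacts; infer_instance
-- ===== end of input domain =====

-- B recasts the task: run-length-compress the case-class sequence and count letter-run
-- boundaries, and answer the digit/letter co-occurrence tests from one case-folded
-- character set; same cost, different algorithm (objective: alternative).

-- ===== PORT A =====
def has_artifacts (label : String) : Bool :=
  let cs := label.toList
  if cs.isEmpty || !(cs.any PySem.Chars.isalpha) then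
    false
  else if [('1', 'I'), ('0', 'O'), ('5', 'S')].any (fun dl =>
      PySem.Chars.isIn [dl.1] cs &&
      PySem.Chars.isIn (PySem.Chars.lower [dl.2]) (PySem.Chars.lower cs)) then
    true
  else
    let transitions : Int :=
      (PySem.List.pyRange 1 cs.length).foldl (fun acc i =>
        if (PySem.Chars.isupper (PySem.List.pyGetD cs i ' ') !=
              PySem.Chars.isupper (PySem.List.pyGetD cs (i - 1) ' ')) &&
            PySem.Chars.isalpha (PySem.List.pyGetD cs i ' ') &&
            PySem.Chars.isalpha (PySem.List.pyGetD cs (i - 1) ' ') then acc + 1 else acc) 0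
    decide (transitions > 2)

-- ===== PORT B =====
-- 0 = non-letter, 1 = lowercase letter, 2 = uppercase letter
def catOf (c : Char) : Int :=
  if PySem.Chars.isalpha c then (if PySem.Chars.isupper c then 2 else 1) else 0

-- the loop body of Source B's run-length compression ('if not runs or runs[-1] != k: runs.append(k)')
def runStep (rs : List Int) (k : Int) : List Int :=
  if rs.isEmpty || rs.getLast? != some k then rs ++ [k] else rs

def has_artifacts_alt (label : String) : Bool :=
  let cats := label.toList.map catOf
  let runs := cats.foldl runStep []
  if !(runs.any (fun k => k != 0)) then          -- any(runs): truthiness = nonzero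
    false
  else if decide ((((runs.zip (runs.drop 1)).countP          -- runs[1:] = drop 1
      (fun ab => ab.1 != 0 && ab.2 != 0) : Nat) : Int) > 2) then
    true
  else
    let seen := PySem.Set.ofList (PySem.Chars.lower label.toList)
    [('1', 'i'), ('0', 'o'), ('5', 's')].any (fun dl =>
      PySem.Set.contains seen dl.1 && PySem.Set.contains seen dl.2)

-- ===== PRECONDITION & SPEC =====
def Spec_has_artifacts (label : String) (out : Bool) : Prop := out = has_artifacts_alt label
instance (label : String) (out : Bool) : Decidable (Spec_has_artifacts label out) := by unfold Spec_has_artifacts; infer_instance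

-- ===== CLAIM (what is proved, stated in full; the proofs are below) =====
def Claim_equal_has_artifacts : Prop := ∀ (label : String), Dom_has_artifacts label → Spec_has_artifacts label (has_artifacts label)

-- ===== LEMMAS AND PROOFS =====

-- A's per-pair transition condition
def artCond (p c : Char) : Bool :=
  PySem.Chars.isalpha c && PySem.Chars.isalpha p &&
    (PySem.Chars.isupper c != PySem.Chars.isupper p)

-- A's transition sum, as a recursion over the character list with the previous character
def pairTrans (p : Option Char) : List Char → Int
  | [] => 0
  | c :: t =>
    (match p with
      | some q => if artCond q c then 1 else 0
      | none => 0) + pairTrans (some c) t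

def lastP (p : Option Char) (cs : List Char) : Option Char :=
  match cs.getLast? with
  | some y => some y
  | none => p

lemma isIn_singleton (c : Char) (s : List Char) : PySem.Chars.isIn [c] s = s.contains c := by
  rcases h : PySem.Chars.isIn [c] s with _ | _
  · rw [PySem.Chars.isIn_eq_false_iff, List.singleton_infix_iff] at h; simpa using h
  · rw [PySem.Chars.isIn_iff_infix, List.singleton_infix_iff] at h; simpa using h

lemma lower_eq_map (cs : List Char) : PySem.Chars.lower cs = cs.map PySem.Chars.lowerChar := by
  simp [PySem.Chars.lower]

lemma pairTrans_snoc (p : Option Char) (cs : List Char) (x : Char) :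
    pairTrans p (cs ++ [x]) =
      pairTrans p cs + (match lastP p cs with
        | some q => if artCond q x then 1 else 0
        | none => 0) := by
  induction cs generalizing p with
  | nil => simp [pairTrans, lastP]
  | cons c t ih =>
    simp only [List.cons_append, pairTrans, ih (some c), lastP]
    cases h : t.getLast? with
    | none => simp [List.getLast?_cons, h]; ring
    | some y => simp [List.getLast?_cons, h]; ring

lemma condIdx_comm (p c : Char) :
    ((PySem.Chars.isupper c != PySem.Chars.isupper p) &&
      PySem.Chars.isalpha c && PySem.Chars.isalpha p) = artCond p c := by
  simp only [artCond]
  cases PySem.Chars.isalpha c <;> cases PySem.Chars.isalpha p <;> simp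

lemma pyGetD_append_left (cs : List Char) (x d : Char) {i : Int} (h0 : 0 ≤ i)
    (h1 : i < (cs.length : Int)) :
    PySem.List.pyGetD (cs ++ [x]) i d = PySem.List.pyGetD cs i d := by
  rw [PySem.List.pyGetD_eq_getElem _ d h0 (by simp; omega),
      PySem.List.pyGetD_eq_getElem _ d h0 h1]
  rw [List.getElem_append_left (by omega)]

lemma countTrans (cs : List Char) :
    (List.countP (fun i =>
        (PySem.Chars.isupper (PySem.List.pyGetD cs i ' ') !=
          PySem.Chars.isupper (PySem.List.pyGetD cs (i - 1) ' ')) &&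
        PySem.Chars.isalpha (PySem.List.pyGetD cs i ' ') &&
        PySem.Chars.isalpha (PySem.List.pyGetD cs (i - 1) ' '))
      (PySem.List.pyRange 1 cs.length) : Int) = pairTrans none cs := by
  induction cs using List.reverseRecOn with
  | nil => simp [pairTrans]
  | append_singleton cs x ih =>
    rcases eq_or_ne cs [] with rfl | hne
    · simp [pairTrans, PySem.List.pyRange]
    · have hpos : 0 < cs.length := List.length_pos_iff.mpr hne
      have hn : 1 ≤ (cs.length : Int) := by exact_mod_cast hpos
      have hlen : ((cs ++ [x]).length : Int) = (cs.length : Int) + 1 := by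
        push_cast [List.length_append]; simp
      rw [hlen, PySem.List.pyRange_one_succ_right hn, List.countP_append]
      have hcongr : List.countP (fun i =>
          (PySem.Chars.isupper (PySem.List.pyGetD (cs ++ [x]) i ' ') !=
            PySem.Chars.isupper (PySem.List.pyGetD (cs ++ [x]) (i - 1) ' ')) &&
          PySem.Chars.isalpha (PySem.List.pyGetD (cs ++ [x]) i ' ') &&
          PySem.Chars.isalpha (PySem.List.pyGetD (cs ++ [x]) (i - 1) ' '))
          (PySem.List.pyRange 1 cs.length)
        = List.countP (fun i =>
          (PySem.Chars.isupper (PySem.List.pyGetD cs i ' ') !=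
            PySem.Chars.isupper (PySem.List.pyGetD cs (i - 1) ' ')) &&
          PySem.Chars.isalpha (PySem.List.pyGetD cs i ' ') &&
          PySem.Chars.isalpha (PySem.List.pyGetD cs (i - 1) ' '))
          (PySem.List.pyRange 1 cs.length) := by
        apply List.countP_congr
        intro i hi
        rw [PySem.List.mem_pyRange_one] at hi
        rw [pyGetD_append_left cs x ' ' (by omega) (by omega),
            pyGetD_append_left cs x ' ' (by omega) (by omega)]
      have hgetn : PySem.List.pyGetD (cs ++ [x]) (cs.length : Int) ' ' = x := by
        rw [PySem.List.pyGetD_eq_getElem _ ' ' (by omega) (by simp)]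
        simp
      have hgetp : PySem.List.pyGetD (cs ++ [x]) ((cs.length : Int) - 1) ' ' = cs.getLast hne := by
        rw [pyGetD_append_left cs x ' ' (by omega) (by omega),
            PySem.List.pyGetD_eq_getElem _ ' ' (by omega) (by omega)]
        rw [List.getLast_eq_getElem]
        congr 1
        omega
      have hlast : lastP none cs = some (cs.getLast hne) := by
        simp [lastP, List.getLast?_eq_some_getLast hne]
      rw [List.countP_cons, List.countP_nil, hcongr, hgetn, hgetp, condIdx_comm,
          pairTrans_snoc, hlast]
      by_cases h : artCond (cs.getLast hne) x = true <;> simp [h] <;> rw [ih]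

lemma A_trans_eq (cs : List Char) :
    ((PySem.List.pyRange 1 cs.length).foldl (fun acc i =>
        if (PySem.Chars.isupper (PySem.List.pyGetD cs i ' ') !=
              PySem.Chars.isupper (PySem.List.pyGetD cs (i - 1) ' ')) &&
            PySem.Chars.isalpha (PySem.List.pyGetD cs i ' ') &&
            PySem.Chars.isalpha (PySem.List.pyGetD cs (i - 1) ' ') then acc + 1 else acc) 0)
      = pairTrans none cs := by
  rw [PySem.List.foldl_if_add_one]
  simpa using countTrans cs

-- ===== B-side: run-length compression =====

-- the runs produced after an accumulator whose last element is p
def rleFrom (p : Int) : List Int → List Int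
  | [] => []
  | a :: t => if a = p then rleFrom p t else a :: rleFrom a t

lemma foldl_runStep (l : List Int) (acc : List Int) (p : Int)
    (h : acc.getLast? = some p) : l.foldl runStep acc = acc ++ rleFrom p l := by
  induction l generalizing acc p with
  | nil => simp [rleFrom]
  | cons a t ih =>
    have hne : acc ≠ [] := by intro hn; simp [hn] at h
    rw [List.foldl_cons]
    by_cases hap : a = p
    · subst hap
      have h1 : runStep acc a = acc := by simp [runStep, h, List.isEmpty_iff, hne]
      have h2 : rleFrom a (a :: t) = rleFrom a t := by simp [rleFrom]
      rw [h1, h2, ih acc a h]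
    · have h1 : runStep acc a = acc ++ [a] := by
        have hb : (acc.getLast? != some a) = true := by
          rw [h]
          simp
          omega
        simp [runStep, hb]
      have h2 : rleFrom p (a :: t) = a :: rleFrom a t := by simp [rleFrom, hap]
      rw [h1, h2, ih (acc ++ [a]) a (by simp), List.append_assoc]
      rfl

-- transition count in category space: pairs over p :: l with both classes nonzero and different
def catTrans (p : Int) : List Int → Int
  | [] => 0
  | a :: t => (if p ≠ 0 ∧ a ≠ 0 ∧ p ≠ a then 1 else 0) + catTrans a t

-- adjacent-pair count (what B's zip-countP computes), as a recursion
def adjNZ : List Int → Int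
  | [] => 0
  | [_] => 0
  | a :: b :: t => (if a ≠ 0 ∧ b ≠ 0 then 1 else 0) + adjNZ (b :: t)

lemma zip_countP_adjNZ (l : List Int) :
    (((l.zip (l.drop 1)).countP (fun ab => ab.1 != 0 && ab.2 != 0) : Nat) : Int) = adjNZ l := by
  induction l with
  | nil => simp [adjNZ]
  | cons a t ih =>
    cases t with
    | nil => simp [adjNZ]
    | cons b t2 =>
      simp only [List.drop_succ_cons, List.drop_zero, List.zip_cons_cons,
        List.countP_cons, adjNZ] at *
      by_cases ha : a ≠ 0 ∧ b ≠ 0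
      · simp [ha.1, ha.2, ← ih]
        ring
      · have : ((a != 0) && (b != 0)) = false := by
          rcases not_and_or.mp ha with h | h <;> simp [not_not.mp h]
        simp [this, ← ih]
        rcases not_and_or.mp ha with h | h <;> simp [not_not.mp h]

lemma adjNZ_rleFrom (t : List Int) (k : Int) :
    adjNZ (k :: rleFrom k t) = catTrans k t := by
  induction t generalizing k with
  | nil => simp [rleFrom, adjNZ, catTrans]
  | cons a t2 ih =>
    by_cases hak : a = k
    · subst hak
      have h2 : rleFrom a (a :: t2) = rleFrom a t2 := by simp [rleFrom]
      rw [h2, ih a]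
      simp [catTrans]
    · simp only [rleFrom, if_neg hak, catTrans]
      have hrec : adjNZ (k :: a :: rleFrom a t2) =
          (if k ≠ 0 ∧ a ≠ 0 then 1 else 0) + adjNZ (a :: rleFrom a t2) := rfl
      rw [hrec, ih]
      have : (k ≠ 0 ∧ a ≠ 0 ∧ k ≠ a) ↔ (k ≠ 0 ∧ a ≠ 0) := by
        constructor
        · rintro ⟨h1, h2, _⟩; exact ⟨h1, h2⟩
        · rintro ⟨h1, h2⟩; exact ⟨h1, h2, fun he => hak he.symm⟩
      rw [if_congr this rfl rfl]

lemma pairTrans_catTrans (l : List Char) (c : Char) :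
    pairTrans (some c) l = catTrans (catOf c) (l.map catOf) := by
  induction l generalizing c with
  | nil => simp [pairTrans, catTrans]
  | cons a t ih =>
    simp only [pairTrans, List.map_cons, catTrans, ih]
    congr 1
    have : artCond c a = true ↔ (catOf c ≠ 0 ∧ catOf a ≠ 0 ∧ catOf c ≠ catOf a) := by
      simp only [artCond, catOf, Bool.and_eq_true, bne_iff_ne]
      cases hc : PySem.Chars.isalpha c <;> cases ha : PySem.Chars.isalpha a <;>
        cases hcu : PySem.Chars.isupper c <;> cases hau : PySem.Chars.isupper a <;>
          simp
    by_cases h : artCond c a = true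
    · rw [if_pos h, if_pos (this.mp h)]
    · rw [if_neg h, if_neg (fun hh => h (this.mpr hh))]

lemma any_nz_rleFrom (t : List Int) (k : Int) :
    (k :: rleFrom k t).any (fun x => x != 0) = (k :: t).any (fun x => x != 0) := by
  induction t generalizing k with
  | nil => simp [rleFrom]
  | cons a t2 ih =>
    by_cases hak : a = k
    · subst hak
      have h2 : rleFrom a (a :: t2) = rleFrom a t2 := by simp [rleFrom]
      rw [h2, ih a]
      simp only [List.any_cons]
      cases h : (a != 0) <;> simp
    · simp only [rleFrom, if_neg hak, List.any_cons]
      have := ih a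
      simp only [List.any_cons] at this
      rw [this]

lemma catOf_nz (c : Char) : (catOf c != 0) = PySem.Chars.isalpha c := by
  simp only [catOf]
  cases h : PySem.Chars.isalpha c <;> cases h2 : PySem.Chars.isupper c <;> simp

-- lowercasing cannot produce a character below 'a' except by leaving it unchanged
lemma lowerChar_eq_low (c d : Char) (hd : d.toNat < 65) :
    (PySem.Chars.lowerChar c = d) ↔ c = d := by
  simp only [PySem.Chars.lowerChar]
  by_cases hu : PySem.Chars.isupper c = true
  · have hb : 65 ≤ c.toNat ∧ c.toNat ≤ 90 := by
      simp only [PySem.Chars.isupper, Bool.and_eq_true, decide_eq_true_eq] at hu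
      obtain ⟨h1, h2⟩ := hu
      rw [Char.le_def] at h1 h2
      exact ⟨UInt32.le_iff_toNat_le.mp h1, UInt32.le_iff_toNat_le.mp h2⟩
    rw [if_pos hu]
    constructor
    · intro h
      exfalso
      have hv : (Char.ofNat (c.toNat + 32)).toNat = c.toNat + 32 := by
        have : Nat.isValidChar (c.toNat + 32) := Or.inl (by omega)
        unfold Char.ofNat
        rw [dif_pos this]
        rfl
      have := congrArg Char.toNat h
      rw [hv] at this
      omega
    · intro h
      exfalso
      subst h
      omega
  · rw [if_neg hu]

lemma mem_map_lower_digit (cs : List Char) (d : Char) (hd : d.toNat < 65) :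
    (cs.map PySem.Chars.lowerChar).contains d = cs.contains d := by
  simp only [List.contains_eq_mem, List.mem_map, decide_eq_decide]
  constructor
  · rintro ⟨x, hx, he⟩
    exact (lowerChar_eq_low x d hd).mp he ▸ hx
  · intro h
    exact ⟨d, h, (lowerChar_eq_low d d hd).mpr rfl⟩

lemma set_contains_ofList (xs : List Char) (x : Char) :
    PySem.Set.contains (PySem.Set.ofList xs) x = xs.contains x := by
  simp only [PySem.Set.contains, List.contains_eq_mem, decide_eq_decide]
  exact PySem.Set.mem_ofList xs x

-- ===== VERDICT (by name: the statement is the Claim_ definition above) =====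
theorem has_artifacts_spec : Claim_equal_has_artifacts := by
  intro label _
  unfold Spec_has_artifacts has_artifacts has_artifacts_alt
  dsimp only
  rw [A_trans_eq]
  -- name the shared character list
  rcases hl : label.toList with _ | ⟨c, t⟩
  · simp
  · -- nonempty input
    have hruns : ((c :: t).map catOf).foldl runStep [] =
        catOf c :: rleFrom (catOf c) (t.map catOf) := by
      simp only [List.map_cons, List.foldl_cons]
      have h1 : runStep [] (catOf c) = [catOf c] := by simp [runStep]
      rw [h1, foldl_runStep (t.map catOf) [catOf c] (catOf c) (by simp)]
      rfl
    rw [hruns, zip_countP_adjNZ, adjNZ_rleFrom, ← pairTrans_catTrans]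
    have hany : (catOf c :: rleFrom (catOf c) (t.map catOf)).any (fun x => x != 0) =
        ((c :: t).any PySem.Chars.isalpha) := by
      rw [any_nz_rleFrom]
      have h1 : (catOf c :: t.map catOf) = (c :: t).map catOf := by simp
      rw [h1, List.any_map]
      simp [Function.comp_def, catOf_nz]
    rw [hany]
    have hpt : pairTrans (some c) t = pairTrans none (c :: t) := by
      simp [pairTrans]
    rw [hpt]
    -- co-occurrence equality
    have hco : ([('1', 'I'), ('0', 'O'), ('5', 'S')].any (fun dl =>
        PySem.Chars.isIn [dl.1] (c :: t) &&
        PySem.Chars.isIn (PySem.Chars.lower [dl.2]) (PySem.Chars.lower (c :: t)))) =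
        ([('1', 'i'), ('0', 'o'), ('5', 's')].any (fun dl =>
          PySem.Set.contains (PySem.Set.ofList (PySem.Chars.lower (c :: t))) dl.1 &&
          PySem.Set.contains (PySem.Set.ofList (PySem.Chars.lower (c :: t))) dl.2)) := by
      simp only [List.any_cons, List.any_nil, Bool.or_false]
      rw [show PySem.Chars.lower ['I'] = ['i'] from by decide,
          show PySem.Chars.lower ['O'] = ['o'] from by decide,
          show PySem.Chars.lower ['S'] = ['s'] from by decide]
      simp only [set_contains_ofList, isIn_singleton]
      rw [lower_eq_map,
          mem_map_lower_digit _ '1' (by decide), mem_map_lower_digit _ '0' (by decide),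
          mem_map_lower_digit _ '5' (by decide)]
    rw [hco]
    -- now a pure boolean rearrangement: guard, then cooc/transitions in either order
    set A := (c :: t).any PySem.Chars.isalpha with hA
    set C := ([('1', 'i'), ('0', 'o'), ('5', 's')].any (fun dl =>
          PySem.Set.contains (PySem.Set.ofList (PySem.Chars.lower (c :: t))) dl.1 &&
          PySem.Set.contains (PySem.Set.ofList (PySem.Chars.lower (c :: t))) dl.2)) with hC
    set T := decide (pairTrans none (c :: t) > 2) with hT
    cases A <;> cases C <;> cases T <;> simp
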